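-- pv_equiv track=rewrite | github.com/SlavikMironov/adventofcode | 2023/day 12/day12.py | compare_spring
-- ===== SOURCE A (Python) =====
-- def compare_spring(spring, damaged_springs):
--     actual_damages_springs = []
--     start_seq = -1
--     spring += "."
--
--     for index, s in enumerate(spring):
--         if s == "#":
--             if start_seq == -1:
--                 start_seq = index
--         else:
--             if start_seq != -1:
--                 actual_damages_springs.append(index - start_seq)
--                 start_seq = -1
--
--     return actual_damages_springs == damaged_springs
-- ===== SOURCE B (Python) =====
-- def compare_spring(spring, damaged_springs):
--     masked = ''.join(ch if ch == '#' else ' ' for ch in spring)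
--     return [len(run) for run in masked.split()] == damaged_springs
-- ===== Notes on version B (the rewrite author's own statement) =====
-- stated objective: idiomatic
-- what changed: Replaces the manual index/sentinel state machine with masking non-'#' chars to spaces and using str.split() to extract maximal '#' runs, comparing their lengths directly.
import Mathlib
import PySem

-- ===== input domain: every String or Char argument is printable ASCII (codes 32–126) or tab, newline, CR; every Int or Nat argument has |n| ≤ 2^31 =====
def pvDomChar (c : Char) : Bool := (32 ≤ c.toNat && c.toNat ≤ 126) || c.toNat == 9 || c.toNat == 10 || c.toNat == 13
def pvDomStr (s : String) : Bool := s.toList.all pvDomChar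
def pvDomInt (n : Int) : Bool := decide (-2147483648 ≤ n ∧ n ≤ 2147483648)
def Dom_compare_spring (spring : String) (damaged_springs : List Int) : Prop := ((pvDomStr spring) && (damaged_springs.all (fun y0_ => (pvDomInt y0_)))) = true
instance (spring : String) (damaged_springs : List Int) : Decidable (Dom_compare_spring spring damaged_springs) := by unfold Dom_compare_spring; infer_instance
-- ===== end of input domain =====

-- B replaces A's index/sentinel state machine by masking non-'#' chars to spaces and
-- splitting on whitespace (str.split), comparing the run lengths directly (idiomatic).

-- ===== PORT A =====
-- loop body of A's for-loop over enumerate(spring): state = (actual_damages_springs, start_seq)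
def stepA (st : List Int × Int) (p : Int × Char) : List Int × Int :=
  if p.2 = '#' then
    (if st.2 = -1 then (st.1, p.1) else st)
  else
    (if st.2 ≠ -1 then (st.1 ++ [p.1 - st.2], -1) else st)

def compare_spring (spring : String) (damaged_springs : List Int) : Bool :=
  let spring2 : List Char := spring.toList ++ ['.']   -- spring += "."
  let fin := (PySem.List.enumerate spring2 0).foldl stepA ([], -1)
  fin.1 == damaged_springs

-- ===== PORT B =====
def compare_spring_alt (spring : String) (damaged_springs : List Int) : Bool :=
  let masked := spring.toList.map (fun c => if c = '#' then c else ' ')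
  (PySem.Chars.split₀ masked).map (fun run => (run.length : Int)) == damaged_springs

-- ===== PRECONDITION & SPEC =====
def Spec_compare_spring (spring : String) (damaged_springs : List Int) (out : Bool) : Prop := out = compare_spring_alt spring damaged_springs
instance (spring : String) (damaged_springs : List Int) (out : Bool) : Decidable (Spec_compare_spring spring damaged_springs out) := by unfold Spec_compare_spring; infer_instance

-- ===== CLAIM (what is proved, stated in full; the proofs are below) =====
def Claim_equal_compare_spring : Prop := ∀ (spring : String) (damaged_springs : List Int), Dom_compare_spring spring damaged_springs → Spec_compare_spring spring damaged_springs (compare_spring spring damaged_springs)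

-- ===== LEMMAS AND PROOFS =====

-- reference run-length extractor: k = length of the current '#' run read so far
def Rgo : List Char → Nat → List Int
  | [], k => if k = 0 then [] else [(k : Int)]
  | c :: cs, k => if c = '#' then Rgo cs (k + 1) else if k = 0 then Rgo cs 0 else (k : Int) :: Rgo cs 0

-- A's loop computes acc ++ run lengths: state start_seq = -1 outside a run, i - k inside a run of k chars
theorem lemA (cs : List Char) : ∀ (i : Int) (accA : List Int) (k : Nat), (k : Int) ≤ i →
    ((PySem.List.enumerate (cs ++ ['.']) i).foldl stepA (accA, if k = 0 then -1 else i - k)).1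
      = accA ++ Rgo cs k := by
  induction cs with
  | nil =>
    intro i accA k hk
    by_cases h : k = 0
    · subst h
      simp [PySem.List.enumerate_cons, PySem.List.enumerate_nil, stepA, Rgo]
    · have hne : i - (k : Int) ≠ -1 := by omega
      simp only [List.nil_append, PySem.List.enumerate_cons, PySem.List.enumerate_nil,
        List.foldl_cons, List.foldl_nil, stepA]
      simp [h, hne, Rgo]
  | cons c cs ih =>
    intro i accA k hk
    simp only [List.cons_append, PySem.List.enumerate_cons, List.foldl_cons, stepA]
    by_cases hc : c = '#' <;> by_cases h : k = 0
    · subst hc; subst h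
      have t := ih (i + 1) accA 1 (by omega)
      norm_num at t ⊢
      rw [t]
      simp [Rgo]
    · subst hc
      have hne : i - (k : Int) ≠ -1 := by omega
      have t := ih (i + 1) accA (k + 1) (by push_cast; omega)
      norm_num at t
      norm_num [h, hne]
      rw [t]
      simp [Rgo]
    · subst h
      have t := ih (i + 1) accA 0 (by omega)
      norm_num at t ⊢
      simp only [if_neg hc]
      rw [t]
      simp [Rgo, hc]
    · have hne : i - (k : Int) ≠ -1 := by omega
      have t := ih (i + 1) (accA ++ [i - (i - (k : Int))]) 0 (by omega)
      norm_num at t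
      simp only [if_neg hc]
      norm_num [h, hne]
      rw [t]
      simp [Rgo, hc, h]

-- B's split.go computes reversed accumulated pieces ++ run lengths, cur = current run
theorem lemB (cs : List Char) : ∀ (k : Nat) (accR : List (List Char)),
    ((PySem.Chars.split₀.go (cs.map (fun c => if c = '#' then c else ' '))
        (List.replicate k '#') accR).map (fun run => (run.length : Int)))
      = accR.reverse.map (fun run => (run.length : Int)) ++ Rgo cs k := by
  induction cs with
  | nil =>
    intro k accR
    by_cases h : k = 0
    · subst h
      simp [PySem.Chars.split₀.go, Rgo]
    · have hne : (List.replicate k '#').isEmpty = false := by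
        cases k with
        | zero => exact absurd rfl h
        | succ n => simp [List.replicate]
      simp [PySem.Chars.split₀.go, hne, Rgo, h]
  | cons c cs ih =>
    intro k accR
    by_cases hc : c = '#'
    · subst hc
      have hsp : PySem.Chars.isspace '#' = false := by decide
      simp only [List.map_cons, PySem.Chars.split₀.go]
      norm_num [hsp]
      have hrep : ('#' :: List.replicate k '#') = List.replicate (k + 1) '#' := by
        simp [List.replicate_succ]
      rw [hrep, ih]
      simp [Rgo]
    · have hsp : PySem.Chars.isspace ' ' = true := by decide
      by_cases h : k = 0
      · subst h
        simp only [List.map_cons, if_neg hc, PySem.Chars.split₀.go]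
        simp only [hsp, if_true, List.replicate_zero, List.isEmpty_nil, if_true]
        have := ih 0 accR
        simp only [List.replicate_zero] at this
        rw [this]
        simp [Rgo, hc]
      · have hne : (List.replicate k '#').isEmpty = false := by
          cases k with
          | zero => exact absurd rfl h
          | succ n => simp [List.replicate]
        simp only [List.map_cons, if_neg hc, PySem.Chars.split₀.go]
        simp only [hsp, if_true, hne, Bool.false_eq_true, if_false]
        have := ih 0 ((List.replicate k '#').reverse :: accR)
        simp only [List.replicate_zero] at this
        rw [this]
        simp [Rgo, hc, h]

theorem compare_spring_eq (spring : String) (damaged_springs : List Int) :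
    compare_spring spring damaged_springs = compare_spring_alt spring damaged_springs := by
  unfold compare_spring compare_spring_alt
  have hA := lemA spring.toList 0 [] 0 (by omega)
  norm_num at hA
  have hB := lemB spring.toList 0 []
  norm_num at hB
  simp only [PySem.Chars.split₀]
  rw [hA, hB]

-- ===== VERDICT (by name: the statement is the Claim_ definition above) =====
theorem compare_spring_spec : Claim_equal_compare_spring := by
  intro spring damaged_springs _
  unfold Spec_compare_spring
  exact compare_spring_eq spring damaged_springs
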